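-- pv_equiv track=rewrite | github.com/pypi-data/pypi-mirror-322 | packages/bio-shark/bio_shark-2.0.2-py3-none-any.whl/bio_shark/core/utils.py | form_sequence_pairs
-- ===== SOURCE A (Python) =====
-- from typing import Mapping, Tuple, Union
--
-- def form_sequence_pairs(id_seq_map: Mapping[str, str],
--                         id_seq_map2: Mapping[str, str] = None
--                         ) -> Mapping[str, Mapping[str, str]]:
--     """
--     Generate unique sequence pairs from one / two list of sequences
--     For one list, compute intra-group pairs and inter-group for two.
--
--     :param (dict[str, str]) id_seq_map: Mapping of sequence with fasta ID. Key -> Fasta ID; Value -> Fasta Sequence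
--     :param (dict[str, str]) id_seq_map2: Mapping of sequence with fasta ID. Key -> Fasta ID; Value -> Fasta Sequence
--     :return (dict[str, dict[str, str]]): Key -> Unique Sequence Pair ID (concatenated);
--         Value -> Dictionary with 'seq_id1', 'seq_id2', 'sequence1', 'sequence2'
--     """
--     pair_id__input_param_map = {}  # Logic: Unique sequence pairs (not all pairs)
--     # In the above dict, key is a unique identifier for the pair
--     id_seq_map2 = id_seq_map2 if id_seq_map2 else id_seq_map
--     for seq_id1, sequence1 in id_seq_map.items():
--         for seq_id2, sequence2 in id_seq_map2.items():
--             pair_id = '__'.join(sorted([seq_id1, seq_id2]))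
--             if pair_id in pair_id__input_param_map:
--                 continue
--             pair_id__input_param_map[pair_id] = {
--                 'seq_id1': seq_id1,
--                 'seq_id2': seq_id2,
--                 'sequence1': sequence1,
--                 'sequence2': sequence2
--             }
--     return pair_id__input_param_map
-- ===== SOURCE B (Python) =====
-- def form_sequence_pairs(id_seq_map, id_seq_map2=None):
--     pairs = {}
--     if id_seq_map2:
--         # genuine two-map case: full product, first-wins per unordered pair id
--         for seq_id1, sequence1 in id_seq_map.items():
--             for seq_id2, sequence2 in id_seq_map2.items():
--                 pairs.setdefault('__'.join(sorted((seq_id1, seq_id2))), {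
--                     'seq_id1': seq_id1, 'seq_id2': seq_id2,
--                     'sequence1': sequence1, 'sequence2': sequence2})
--     else:
--         # single-map case: enumerate each unordered pair once, earlier item first
--         rest = list(id_seq_map.items())
--         while rest:
--             seq_id1, sequence1 = rest[0]
--             for seq_id2, sequence2 in rest:
--                 pairs.setdefault('__'.join(sorted((seq_id1, seq_id2))), {
--                     'seq_id1': seq_id1, 'seq_id2': seq_id2,
--                     'sequence1': sequence1, 'sequence2': sequence2})
--             rest = rest[1:]
--     return pairs
-- ===== Notes on version B (the rewrite author's own statement) =====
-- stated objective: alternative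
-- what changed: In the single-map case B enumerates each unordered pair exactly once (shrinking-suffix loop, about half as many iterations) and uses dict.setdefault everywhere instead of A's full n-by-n product with an explicit membership-check-and-continue.
import Mathlib
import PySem

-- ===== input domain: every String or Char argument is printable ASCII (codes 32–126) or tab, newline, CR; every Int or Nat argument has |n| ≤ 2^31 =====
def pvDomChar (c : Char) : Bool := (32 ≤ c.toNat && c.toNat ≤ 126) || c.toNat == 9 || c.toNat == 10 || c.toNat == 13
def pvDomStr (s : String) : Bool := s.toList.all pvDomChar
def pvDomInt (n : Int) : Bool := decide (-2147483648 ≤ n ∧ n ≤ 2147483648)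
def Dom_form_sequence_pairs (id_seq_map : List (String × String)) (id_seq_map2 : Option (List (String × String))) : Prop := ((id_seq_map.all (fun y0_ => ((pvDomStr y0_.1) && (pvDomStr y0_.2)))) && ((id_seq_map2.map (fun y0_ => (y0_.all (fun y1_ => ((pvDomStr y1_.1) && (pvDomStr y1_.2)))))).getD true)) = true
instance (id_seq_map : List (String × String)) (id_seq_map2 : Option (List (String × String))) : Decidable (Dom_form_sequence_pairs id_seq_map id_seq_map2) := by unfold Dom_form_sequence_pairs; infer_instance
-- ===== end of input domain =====

-- B reorganises the pairing: when only one map is given it enumerates each unordered pair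
-- once via a shrinking-suffix loop with dict.setdefault, instead of A's full n×n product
-- with an explicit membership check; same return value everywhere (alternative decomposition).


-- shared helpers: the pair id '__'.join(sorted([a, b])) and the record dict (both Pythons
-- compute these with identical expressions)
def pvKey (a b : String) : String :=
  PySem.Str.join "__" (PySem.List.sorted [a, b] (fun x => x) false)

def pvRec (id1 s1 id2 s2 : String) : List (String × String) :=
  [("seq_id1", id1), ("seq_id2", id2), ("sequence1", s1), ("sequence2", s2)]

-- ===== PORT A =====
def form_sequence_pairs (id_seq_map : List (String × String)) (id_seq_map2 : Option (List (String × String))) : List (String × List (String × String)) :=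
  -- the match/if computes: id_seq_map2 = id_seq_map2 if id_seq_map2 else id_seq_map (falsy: None or empty dict)
  (id_seq_map.foldl (fun d p =>
      (match id_seq_map2 with
       | none => id_seq_map
       | some l => if l.isEmpty then id_seq_map else l).foldl (fun d (q : String × String) =>
          if d.contains (pvKey p.1 q.1) then d
          else d.insert (pvKey p.1 q.1) (pvRec p.1 p.2 q.1 q.2)) d)
    PySem.Dict.empty).items

-- ===== PORT B =====
-- the single-map suffix loop: 'while rest: head = rest[0]; for q in rest: setdefault; rest = rest[1:]'
def pvGoSingle : List (String × String) → PySem.Dict String (List (String × String)) → PySem.Dict String (List (String × String))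
  | [], pairs => pairs
  | x :: t, pairs =>
      pvGoSingle t ((x :: t).foldl (fun d q =>
        PySem.Dict.setdefault d (pvKey x.1 q.1) (pvRec x.1 x.2 q.1 q.2)) pairs)

def form_sequence_pairs_alt (id_seq_map : List (String × String)) (id_seq_map2 : Option (List (String × String))) : List (String × List (String × String)) :=
  match id_seq_map2 with
  | some l2 =>
    if l2.isEmpty then (pvGoSingle id_seq_map PySem.Dict.empty).items
    else
      -- genuine two-map case: full product with setdefault
      (id_seq_map.foldl (fun d p =>
          l2.foldl (fun d q =>
            PySem.Dict.setdefault d (pvKey p.1 q.1) (pvRec p.1 p.2 q.1 q.2)) d)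
        PySem.Dict.empty).items
  | none => (pvGoSingle id_seq_map PySem.Dict.empty).items

-- ===== PRECONDITION & SPEC =====
def Spec_form_sequence_pairs (id_seq_map : List (String × String)) (id_seq_map2 : Option (List (String × String))) (out : List (String × List (String × String))) : Prop := out = form_sequence_pairs_alt id_seq_map id_seq_map2
instance (id_seq_map : List (String × String)) (id_seq_map2 : Option (List (String × String))) (out : List (String × List (String × String))) : Decidable (Spec_form_sequence_pairs id_seq_map id_seq_map2 out) := by unfold Spec_form_sequence_pairs; infer_instance

-- ===== CLAIM (what is proved, stated in full; the proofs are below) =====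
def Claim_equal_form_sequence_pairs : Prop := ∀ (id_seq_map : List (String × String)) (id_seq_map2 : Option (List (String × String))), Dom_form_sequence_pairs id_seq_map id_seq_map2 → Spec_form_sequence_pairs id_seq_map id_seq_map2 (form_sequence_pairs id_seq_map id_seq_map2)

-- ===== LEMMAS AND PROOFS =====

-- A's loop body, named for the proofs
def pvStep (d : PySem.Dict String (List (String × String))) (p q : String × String) : PySem.Dict String (List (String × String)) :=
  if d.contains (pvKey p.1 q.1) then d
  else d.insert (pvKey p.1 q.1) (pvRec p.1 p.2 q.1 q.2)

theorem pvSetdefault_eq (d : PySem.Dict String (List (String × String))) (p q : String × String) :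
    PySem.Dict.setdefault d (pvKey p.1 q.1) (pvRec p.1 p.2 q.1 q.2) = pvStep d p q := by
  by_cases h : d.contains (pvKey p.1 q.1) <;>
    simp [PySem.Dict.setdefault, PySem.Dict.insert, pvStep, h]

theorem pvKey_symm (a b : String) : pvKey a b = pvKey b a := by
  unfold pvKey
  rw [PySem.List.sorted_eq_sorted_of_perm [a, b] [b, a] (fun x => x)
    (fun _ _ h => h) (List.Perm.swap b a [])]

theorem pvStep_contains_mono {d : PySem.Dict String (List (String × String))} {k : String}
    (h : d.contains k = true) (p q : String × String) : (pvStep d p q).contains k = true := by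
  unfold pvStep
  split
  · exact h
  · simp [PySem.Dict.contains_insert, h]

theorem pvFoldl_contains_mono {k : String} (f : String × String) (u : List (String × String))
    {d : PySem.Dict String (List (String × String))} (h : d.contains k = true) :
    (u.foldl (fun d q => pvStep d f q) d).contains k = true := by
  induction u generalizing d with
  | nil => exact h
  | cons q u ih => exact ih (pvStep_contains_mono h f q)

theorem pvStep_skip {d : PySem.Dict String (List (String × String))} {p q : String × String}
    (h : d.contains (pvKey p.1 q.1) = true) : pvStep d p q = d := by
  simp [pvStep, h]

-- after the inner loop for head x, every key pvKey x.1 q.1 with q in the loop is present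
theorem pvContains_after_inner (x : String × String) (u : List (String × String))
    (d : PySem.Dict String (List (String × String))) {q : String × String} (hq : q ∈ u) :
    ((u.foldl (fun d q => pvStep d x q) d).contains (pvKey x.1 q.1)) = true := by
  induction u generalizing d with
  | nil => cases hq
  | cons r u ih =>
    rcases List.mem_cons.mp hq with h | h
    · subst h
      rw [List.foldl_cons]
      apply pvFoldl_contains_mono
      by_cases hc : d.contains (pvKey x.1 q.1)
      · rw [pvStep_skip hc]; exact hc
      · rw [show pvStep d x q = d.insert (pvKey x.1 q.1) (pvRec x.1 x.2 q.1 q.2) from by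
          simp [pvStep, hc]]
        exact PySem.Dict.contains_insert_self d _ _
    · exact ih _ h

-- drop the already-seen head element from each inner loop
theorem pvDropHead (x : String × String) (t : List (String × String))
    (u : List (String × String)) (d : PySem.Dict String (List (String × String)))
    (h : ∀ p ∈ u, d.contains (pvKey p.1 x.1) = true) :
    u.foldl (fun d p => (x :: t).foldl (fun d q => pvStep d p q) d) d
      = u.foldl (fun d p => t.foldl (fun d q => pvStep d p q) d) d := by
  induction u generalizing d with
  | nil => rfl
  | cons p u ih =>
    have hx : d.contains (pvKey p.1 x.1) = true := h p (List.mem_cons_self ..)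
    simp only [List.foldl_cons, pvStep_skip hx]
    exact ih _ (fun r hr => pvFoldl_contains_mono p t (h r (List.mem_cons_of_mem _ hr)))

-- A's full product equals B's suffix loop (same dict after both)
theorem pvMain (l : List (String × String)) (d : PySem.Dict String (List (String × String))) :
    l.foldl (fun d p => l.foldl (fun d q => pvStep d p q) d) d = pvGoSingle l d := by
  induction l generalizing d with
  | nil => rfl
  | cons x t ih =>
    simp only [List.foldl_cons, pvGoSingle]
    set d' := (t.foldl (fun d q => pvStep d x q) (pvStep d x x)) with hd'
    have hcontains : ∀ p ∈ t, d'.contains (pvKey p.1 x.1) = true := by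
      intro p hp
      rw [pvKey_symm]
      have := pvContains_after_inner x (x :: t) d (List.mem_cons_of_mem _ hp)
      simpa [hd'] using this
    calc t.foldl (fun d p => (x :: t).foldl (fun d q => pvStep d p q) d) d'
        = t.foldl (fun d p => t.foldl (fun d q => pvStep d p q) d) d' := pvDropHead x t t d' hcontains
      _ = pvGoSingle t d' := ih d'
      _ = pvGoSingle (x :: t) d := by
          simp only [pvGoSingle, pvSetdefault_eq, List.foldl_cons, hd']

-- rewrite B's setdefault loops into pvStep loops
theorem pvAltSetdefault (l l2 : List (String × String)) (d : PySem.Dict String (List (String × String))) :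
    l.foldl (fun d p => l2.foldl (fun d q => PySem.Dict.setdefault d (pvKey p.1 q.1) (pvRec p.1 p.2 q.1 q.2)) d) d
      = l.foldl (fun d p => l2.foldl (fun d q => pvStep d p q) d) d := by
  simp only [pvSetdefault_eq]

-- ===== VERDICT (by name: the statement is the Claim_ definition above) =====
theorem form_sequence_pairs_spec : Claim_equal_form_sequence_pairs := by
  intro m m2 _
  unfold Spec_form_sequence_pairs form_sequence_pairs form_sequence_pairs_alt
  cases m2 with
  | none => exact congrArg PySem.Dict.items (pvMain m PySem.Dict.empty)
  | some l2 =>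
    by_cases h : l2.isEmpty
    · have hl : l2 = [] := by simpa [List.isEmpty_iff] using h
      subst hl
      exact congrArg PySem.Dict.items (pvMain m PySem.Dict.empty)
    · dsimp only
      rw [if_neg h, if_neg h, pvAltSetdefault]
      rfl
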